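-- pv_equiv track=rewrite | github.com/artemlaw/market_api_app | market_api_app/utils_wb_async.py | get_stocks_info
-- ===== SOURCE A (Python) =====
-- def get_stocks_info(sizes):
--     fbs_stock = 0
--     fbo_stock = 0
--
--     for size in sizes:
--         stocks = size.get('stocks')
--         for stock in stocks:
--             wh_id = stock.get('wh')
--             if wh_id == 119261:
--                 fbs_stock += stock.get('qty')
--             else:
--                 fbo_stock += stock.get('qty')
--
--     return fbs_stock, fbo_stock
-- ===== SOURCE B (Python) =====
-- def get_stocks_info(sizes):
--     totals = {}
--     for size in sizes:
--         for stock in size.get('stocks'):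
--             wh = stock.get('wh')
--             totals[wh] = totals.get(wh, 0) + stock.get('qty')
--     fbs_stock = totals.get(119261, 0)
--     fbo_stock = sum(v for k, v in totals.items() if k != 119261)
--     return fbs_stock, fbo_stock
-- ===== Notes on version B (the rewrite author's own statement) =====
-- stated objective: alternative
-- what changed: Replaces the two scalar if/else accumulators with a per-warehouse totals dict built in one pass, then a separate second pass partitions the table into the FBS bucket (key 119261) and the summed FBO bucket.
import Mathlib
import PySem

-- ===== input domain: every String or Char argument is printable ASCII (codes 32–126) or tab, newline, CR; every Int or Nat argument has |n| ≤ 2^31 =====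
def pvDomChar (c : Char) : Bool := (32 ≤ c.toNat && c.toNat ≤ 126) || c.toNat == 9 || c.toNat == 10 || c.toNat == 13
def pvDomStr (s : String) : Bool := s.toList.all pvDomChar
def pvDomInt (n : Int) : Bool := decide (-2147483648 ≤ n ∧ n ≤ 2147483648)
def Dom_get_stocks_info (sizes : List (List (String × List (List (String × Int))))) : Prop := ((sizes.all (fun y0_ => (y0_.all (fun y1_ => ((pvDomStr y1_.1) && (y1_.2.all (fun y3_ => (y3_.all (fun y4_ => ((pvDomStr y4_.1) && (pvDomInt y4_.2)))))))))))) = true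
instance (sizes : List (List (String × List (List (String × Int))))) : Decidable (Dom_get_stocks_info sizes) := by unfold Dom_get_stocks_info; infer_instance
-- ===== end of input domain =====

-- B replaces A's two scalar if/else accumulators with a per-warehouse totals dict built in
-- one pass, then a second pass partitions that table into the 119261 (FBS) bucket and the
-- summed rest (FBO); same return value, no speed claim.

-- ===== PORT A =====
-- one stock of A's inner loop: add qty to the matching scalar accumulator
def pvStepA (acc : Int × Int) (stock : List (String × Int)) : Int × Int :=
  let wh_id := (PySem.Dict.mk stock).get? "wh"
  if wh_id == some 119261 then
    (acc.1 + ((PySem.Dict.mk stock).get? "qty").getD 0, acc.2)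
  else
    (acc.1, acc.2 + ((PySem.Dict.mk stock).get? "qty").getD 0)

def get_stocks_info (sizes : List (List (String × List (List (String × Int))))) : Int × Int :=
  sizes.foldl
    (fun acc size => (((PySem.Dict.mk size).get? "stocks").getD []).foldl pvStepA acc)
    (0, 0)

-- ===== PORT B =====
-- one stock of B's loop: totals[wh] = totals.get(wh, 0) + stock.get('qty')
def pvStepB (d : PySem.Dict (Option Int) Int) (stock : List (String × Int)) : PySem.Dict (Option Int) Int :=
  let wh := (PySem.Dict.mk stock).get? "wh"
  d.insert wh (d.getD wh 0 + ((PySem.Dict.mk stock).get? "qty").getD 0)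

def get_stocks_info_alt (sizes : List (List (String × List (List (String × Int))))) : Int × Int :=
  let totals := sizes.foldl
    (fun d size => (((PySem.Dict.mk size).get? "stocks").getD []).foldl pvStepB d)
    PySem.Dict.empty
  let fbs_stock := totals.getD (some 119261) 0
  let fbo_stock := totals.items.foldl (fun s kv => if kv.1 ≠ some 119261 then s + kv.2 else s) 0
  (fbs_stock, fbo_stock)

-- ===== PRECONDITION & SPEC =====
-- Pre_ excludes exactly the inputs where the Python raises TypeError (in both A and B):
-- a size dict without a 'stocks' key (iterating None) or a stock dict without a 'qty' key
-- (adding None to an int).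
def Pre_get_stocks_info (sizes : List (List (String × List (List (String × Int))))) : Prop :=
  (sizes.all (fun size =>
    match (PySem.Dict.mk size).get? "stocks" with
    | none => false
    | some stocks => stocks.all (fun stock => ((PySem.Dict.mk stock).get? "qty").isSome))) = true
instance (sizes : List (List (String × List (List (String × Int))))) : Decidable (Pre_get_stocks_info sizes) := by unfold Pre_get_stocks_info; infer_instance

def pvWitness_get_stocks_info : (List (List (String × List (List (String × Int))))) :=
  [[("stocks", [[("wh", 119261), ("qty", 5)], [("wh", 7), ("qty", 3)]])],
   [("stocks", [[("qty", 2)]])]]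

def Spec_get_stocks_info (sizes : List (List (String × List (List (String × Int))))) (out : Int × Int) : Prop := out = get_stocks_info_alt sizes
instance (sizes : List (List (String × List (List (String × Int))))) (out : Int × Int) : Decidable (Spec_get_stocks_info sizes out) := by unfold Spec_get_stocks_info; infer_instance

-- ===== CLAIM (what is proved, stated in full; the proofs are below) =====
def Claim_equal_get_stocks_info : Prop := ∀ (sizes : List (List (String × List (List (String × Int))))), Dom_get_stocks_info sizes → Pre_get_stocks_info sizes → Spec_get_stocks_info sizes (get_stocks_info sizes)

-- ===== LEMMAS AND PROOFS =====

-- sum of the values of the entries whose key is not 119261 (B's FBO bucket)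
def pvSumO (l : List (Option Int × Int)) : Int :=
  ((l.filter (fun kv => kv.1 ≠ some 119261)).map (·.2)).sum

lemma pvFoldl_sumO (l : List (Option Int × Int)) (s : Int) :
    l.foldl (fun s kv => if kv.1 ≠ some 119261 then s + kv.2 else s) s = s + pvSumO l := by
  induction l generalizing s with
  | nil => simp [pvSumO]
  | cons kv t ih =>
    by_cases h : kv.1 = some 119261
    · simp only [List.foldl_cons, if_neg (not_not_intro h)]
      rw [ih]; simp [pvSumO, h]
    · simp only [List.foldl_cons, if_pos h]
      rw [ih]; simp [pvSumO, h]; ring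

lemma pvSumO_append (l : List (Option Int × Int)) (k : Option Int) (v : Int) (hk : k ≠ some 119261) :
    pvSumO (l ++ [(k, v)]) = pvSumO l + v := by
  simp [pvSumO, hk]

lemma pvSumO_map_K (l : List (Option Int × Int)) (v : Int) :
    pvSumO (l.map (fun p => if p.1 == some 119261 then (some 119261, v) else p)) = pvSumO l := by
  induction l with
  | nil => rfl
  | cons p t ih =>
    by_cases h : p.1 = some 119261
    · have hbeq : (p.1 == some 119261) = true := beq_iff_eq.mpr h
      simp only [List.map_cons, hbeq, if_true]
      simp [pvSumO, h] at ih ⊢; exact ih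
    · have hbeq : (p.1 == some 119261) = false := by simpa using h
      simp only [List.map_cons, hbeq, Bool.false_eq_true, if_false]
      simp [pvSumO, h] at ih ⊢; omega

lemma pvSumO_map_ne (l : List (Option Int × Int)) (k : Option Int) (w v : Int)
    (hk : k ≠ some 119261) (hnd : (l.map (·.1)).Nodup) (hm : (k, w) ∈ l) :
    pvSumO (l.map (fun p => if p.1 == k then (k, v) else p)) = pvSumO l - w + v := by
  induction l with
  | nil => simp at hm
  | cons p t ih =>
    simp only [List.map_cons, List.nodup_cons] at hnd
    rcases List.mem_cons.mp hm with h | h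
    · subst h
      have hrest : t.map (fun p => if p.1 == k then (k, v) else p) = t := by
        calc t.map (fun p => if p.1 == k then (k, v) else p) = t.map id := by
              apply List.map_congr_left
              intro q hq
              have hqk : q.1 ≠ k := fun hqe =>
                hnd.1 (hqe ▸ (List.mem_map_of_mem hq : q.1 ∈ t.map (·.1)))
              simp [hqk]
          _ = t := List.map_id t
      simp only [List.map_cons, beq_self_eq_true, if_true]
      rw [hrest]
      simp [pvSumO, hk]
      ring
    · have hpk : p.1 ≠ k := fun hpe =>
        hnd.1 (hpe ▸ (List.mem_map_of_mem h : k ∈ t.map (·.1)))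
      have hih := ih hnd.2 h
      have hbeq : (p.1 == k) = false := by simpa using hpk
      simp only [List.map_cons, hbeq, Bool.false_eq_true, if_false]
      by_cases hp : p.1 = some 119261
      · simp [pvSumO, hp] at hih ⊢; omega
      · simp [pvSumO, hp] at hih ⊢; omega

-- the loop invariant relating A's scalar pair to B's totals dict
def pvInv (d : PySem.Dict (Option Int) Int) (p : Int × Int) : Prop :=
  d.keys.Nodup ∧ p.1 = d.getD (some 119261) 0 ∧ p.2 = pvSumO d.items

lemma pvStep_inv (d : PySem.Dict (Option Int) Int) (p : Int × Int)
    (stock : List (String × Int)) (h : pvInv d p) : pvInv (pvStepB d stock) (pvStepA p stock) := by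
  obtain ⟨hnd, h1, h2⟩ := h
  set wh := (PySem.Dict.mk stock).get? "wh" with hwh
  set q := ((PySem.Dict.mk stock).get? "qty").getD 0 with hq
  have hkeys : (pvStepB d stock).keys.Nodup := by
    have := PySem.Dict.nodup_keys_insert d wh (d.getD wh 0 + q) hnd
    simpa [pvStepB] using this
  refine ⟨hkeys, ?_, ?_⟩ <;>
    simp only [pvStepA, pvStepB, ← hwh, ← hq] <;>
    by_cases hw : wh = some 119261
  · rw [hw]; simp [h1]
  · have hbeq : (wh == some 119261) = false := by simpa using hw
    simp only [hbeq, Bool.false_eq_true, if_false]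
    show p.1 = _
    rw [PySem.Dict.getD_insert, if_neg (fun hh => hw hh.symm)]
    exact h1
  · rw [hw]
    simp only [beq_self_eq_true, if_true]
    show p.2 = _
    by_cases hc : d.contains (some 119261)
    · rw [PySem.Dict.items_insert_of_contains _ _ hc, pvSumO_map_K]; exact h2
    · rw [PySem.Dict.items_insert_of_not_contains _ _ (by simpa using hc), h2]
      simp [pvSumO]
  · have hbeq : (wh == some 119261) = false := by simpa using hw
    simp only [hbeq, Bool.false_eq_true, if_false]
    show p.2 + q = _
    by_cases hc : d.contains wh
    · have hget : d.get? wh = some (d.getD wh 0) := by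
        rcases hg : d.get? wh with _ | w
        · exfalso; rw [PySem.Dict.contains_eq_isSome_get?, hg] at hc; simp at hc
        · rw [PySem.Dict.getD_eq_get?_getD, hg]; rfl
      have hmem : (wh, d.getD wh 0) ∈ d.items :=
        PySem.Dict.mem_items_of_get?_eq_some d hget
      rw [PySem.Dict.items_insert_of_contains _ _ hc]
      have hnd' : (d.items.map (·.1)).Nodup := by
        simpa [PySem.Dict.keys] using hnd
      rw [pvSumO_map_ne d.items wh (d.getD wh 0) _ hw hnd' hmem, h2]
      ring
    · have hc' : d.contains wh = false := by simpa using hc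
      rw [PySem.Dict.items_insert_of_not_contains _ _ hc',
          pvSumO_append _ _ _ hw, PySem.Dict.getD_of_not_contains _ _ hc', h2]
      ring

lemma pvLoop_inner (stocks : List (List (String × Int))) (d : PySem.Dict (Option Int) Int)
    (p : Int × Int) (h : pvInv d p) : pvInv (stocks.foldl pvStepB d) (stocks.foldl pvStepA p) := by
  induction stocks generalizing d p with
  | nil => exact h
  | cons s t ih => exact ih _ _ (pvStep_inv d p s h)

lemma pvLoop_outer (sizes : List (List (String × List (List (String × Int)))))
    (d : PySem.Dict (Option Int) Int) (p : Int × Int) (h : pvInv d p) :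
    pvInv (sizes.foldl (fun d size => (((PySem.Dict.mk size).get? "stocks").getD []).foldl pvStepB d) d)
          (sizes.foldl (fun acc size => (((PySem.Dict.mk size).get? "stocks").getD []).foldl pvStepA acc) p) := by
  induction sizes generalizing d p with
  | nil => exact h
  | cons s t ih => exact ih _ _ (pvLoop_inner _ d p h)

-- ===== VERDICT (by name: the statement is the Claim_ definition above) =====
theorem get_stocks_info_spec : Claim_equal_get_stocks_info := by
  intro sizes _ _
  unfold Spec_get_stocks_info get_stocks_info get_stocks_info_alt
  have h0 : pvInv PySem.Dict.empty ((0 : Int), (0 : Int)) := by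
    refine ⟨PySem.Dict.nodup_keys_empty, ?_, ?_⟩
    · rw [PySem.Dict.getD_empty]
    · rfl
  obtain ⟨-, h1, h2⟩ := pvLoop_outer sizes PySem.Dict.empty (0, 0) h0
  simp only [pvFoldl_sumO, zero_add]
  exact Prod.ext h1 h2
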